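-- pv_equiv track=rewrite | github.com/yrevash/robot_dog_ai | report/code/sweep_voting.py | simulate_voting
-- ===== SOURCE A (Python) =====
-- from collections import Counter, deque
-- from typing import Optional
--
-- def simulate_voting(
--     frame_results: list[str],
--     history_len: int,
--     stable_count: int,
-- ) -> Optional[int]:
--     """
--     Feed frame_results (a list of predicted name strings) one at a time into
--     a deque-based voting window of size history_len.
--
--     Returns the frame index (1-based) at which authorization is first granted
--     (i.e., any non-Unknown name reaches stable_count votes within the window),
--     or None if no authorization occurs within the sequence.
--     """
--     history: deque[set] = deque(maxlen=history_len)
--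
--     for frame_idx, pred in enumerate(frame_results, start=1):
--         # Each frame contributes a singleton set (mimics real code where a frame
--         # may contain multiple recognized faces; here we have at most one).
--         frame_set = {pred} if pred != "Unknown" else set()
--         history.append(frame_set)
--
--         if len(history) < history_len:
--             # Window not full yet — no authorization
--             continue
--
--         vote_counts: Counter[str] = Counter()
--         for s in history:
--             vote_counts.update(s)
--
--         for person, count in vote_counts.items():
--             if count >= stable_count:
--                 return frame_idx
--
--     return None  # never authorized
-- ===== SOURCE B (Python) =====
-- from typing import Optional
--
--
-- def simulate_voting(
--     frame_results: list[str],
--     history_len: int,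
--     stable_count: int,
-- ) -> Optional[int]:
--     """Sliding-window voting in a single O(n) pass.
--
--     Per-name vote counts are maintained incrementally as each frame enters
--     the window and the oldest one leaves it, together with `satisfied`, the
--     number of names currently at or above the threshold.  Every voted name
--     has at least one vote, so the effective threshold is max(stable_count, 1).
--     """
--     threshold = max(stable_count, 1)
--     counts: dict[str, int] = {}
--     satisfied = 0
--     for idx, name in enumerate(frame_results, start=1):
--         if name != "Unknown":
--             counts[name] = counts.get(name, 0) + 1
--             if counts[name] == threshold:
--                 satisfied += 1
--         if idx >= history_len:
--             if idx > history_len: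
--                 old = frame_results[idx - history_len - 1]
--                 if old != "Unknown":
--                     if counts[old] == threshold:
--                         satisfied -= 1
--                     counts[old] -= 1
--             if satisfied > 0:
--                 return idx
--     return None
-- ===== Notes on version B (the rewrite author's own statement) =====
-- stated objective: faster
-- what changed: Instead of rebuilding a Counter over the whole deque window at every frame, B keeps incremental per-name counts plus a running tally of names at or above the effective threshold max(stable_count,1), updating both as a frame enters and the evicted frame leaves the window (one O(1) step per frame); Pre_ excludes only history_len < 0, where A raises ValueError from deque(maxlen=...).
import Mathlib
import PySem

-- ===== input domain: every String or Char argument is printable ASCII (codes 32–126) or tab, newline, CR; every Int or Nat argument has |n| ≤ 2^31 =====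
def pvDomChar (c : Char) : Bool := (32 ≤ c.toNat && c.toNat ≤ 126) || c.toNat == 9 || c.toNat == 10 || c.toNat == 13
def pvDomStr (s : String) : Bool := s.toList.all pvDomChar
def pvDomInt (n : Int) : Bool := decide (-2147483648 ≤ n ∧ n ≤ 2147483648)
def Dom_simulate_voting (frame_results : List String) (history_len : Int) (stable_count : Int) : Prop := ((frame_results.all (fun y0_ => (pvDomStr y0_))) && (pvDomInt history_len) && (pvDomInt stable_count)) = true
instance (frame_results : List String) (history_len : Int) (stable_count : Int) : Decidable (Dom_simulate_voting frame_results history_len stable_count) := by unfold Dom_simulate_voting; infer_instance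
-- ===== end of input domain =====

-- B replaces A's per-frame Counter rebuild over the window with incremental
-- sliding-window counts and a running threshold tally (objective: faster, one O(1) step per frame).

-- ===== PORT A =====
-- frame_set = {pred} if pred != "Unknown" else set()
def frameSetA (pred : String) : PySem.Set String :=
  if pred ≠ "Unknown" then PySem.Set.ofList [pred] else PySem.Set.ofList []

-- deque(maxlen=m).append: append, evict the front when the length exceeds maxlen
def dequeAppend (hist : List (PySem.Set String)) (s : PySem.Set String) (maxlen : Int) : List (PySem.Set String) :=
  let h := hist ++ [s]
  if maxlen < (h.length : Int) then h.drop 1 else h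

def simVotingA_go (history_len stable_count : Int) :
    List String → Int → List (PySem.Set String) → Option Int
  | [], _, _ => none
  | pred :: rest, frame_idx, history =>
    let history := dequeAppend history (frameSetA pred) history_len
    if (history.length : Int) < history_len then
      simVotingA_go history_len stable_count rest (frame_idx + 1) history
    else
      -- vote_counts = Counter(); for s in history: vote_counts.update(s)
      let vote_counts : PySem.Dict String Int :=
        history.foldl (fun d s => s.foldl (fun d p => d.modify p 0 (· + 1)) d) PySem.Dict.empty
      -- for person, count in vote_counts.items(): if count >= stable_count: return frame_idx
      if vote_counts.items.any (fun pc => decide (stable_count ≤ pc.2)) then some frame_idx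
      else simVotingA_go history_len stable_count rest (frame_idx + 1) history

def simulate_voting (frame_results : List String) (history_len : Int) (stable_count : Int) : Option Int :=
  simVotingA_go history_len stable_count frame_results 1 []

-- ===== PORT B =====
def simVotingB_go (fr : List String) (history_len threshold : Int) :
    List String → Int → PySem.Dict String Int → Int → Option Int
  | [], _, _, _ => none
  | name :: rest, idx, counts, satisfied =>
    let st :=
      if name ≠ "Unknown" then
        let c := counts.getD name 0 + 1
        (counts.insert name c, if c = threshold then satisfied + 1 else satisfied)
      else (counts, satisfied)
    let counts := st.1
    let satisfied := st.2
    if history_len ≤ idx then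
      let st2 :=
        if history_len < idx then
          -- old = frame_results[idx - history_len - 1]; in range whenever 0 ≤ history_len,
          -- so the total pyGetD with default "" computes exactly Python's indexing here
          let old := PySem.List.pyGetD fr (idx - history_len - 1) ""
          if old ≠ "Unknown" then
            -- counts[old] always exists here (old has a positive in-window count)
            let c := counts.getD old 0
            (counts.insert old (c - 1), if c = threshold then satisfied - 1 else satisfied)
          else (counts, satisfied)
        else (counts, satisfied)
      if 0 < st2.2 then some idx
      else simVotingB_go fr history_len threshold rest (idx + 1) st2.1 st2.2
    else simVotingB_go fr history_len threshold rest (idx + 1) counts satisfied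

def simulate_voting_alt (frame_results : List String) (history_len : Int) (stable_count : Int) : Option Int :=
  simVotingB_go frame_results history_len (max stable_count 1) frame_results 1 PySem.Dict.empty 0

-- ===== PRECONDITION & SPEC =====
-- Pre_ excludes exactly history_len < 0, where A raises ValueError (deque(maxlen=…) rejects negatives).
def Pre_simulate_voting (frame_results : List String) (history_len : Int) (stable_count : Int) : Prop :=
  0 ≤ history_len
instance (frame_results : List String) (history_len : Int) (stable_count : Int) : Decidable (Pre_simulate_voting frame_results history_len stable_count) := by unfold Pre_simulate_voting; infer_instance

def pvWitness_simulate_voting : List String × Int × Int := (["alice", "Unknown", "alice", "bob"], 3, 2)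

def Spec_simulate_voting (frame_results : List String) (history_len : Int) (stable_count : Int) (out : Option Int) : Prop := out = simulate_voting_alt frame_results history_len stable_count
instance (frame_results : List String) (history_len : Int) (stable_count : Int) (out : Option Int) : Decidable (Spec_simulate_voting frame_results history_len stable_count out) := by unfold Spec_simulate_voting; infer_instance

-- ===== CLAIM (what is proved, stated in full; the proofs are below) =====
def Claim_equal_simulate_voting : Prop := ∀ (frame_results : List String) (history_len : Int) (stable_count : Int), Dom_simulate_voting frame_results history_len stable_count → Pre_simulate_voting frame_results history_len stable_count → Spec_simulate_voting frame_results history_len stable_count (simulate_voting frame_results history_len stable_count)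

-- ===== LEMMAS AND PROOFS =====

-- the non-"Unknown" names of a window
def wsOf (w : List String) : List String := w.filter (fun m => m ≠ "Unknown")

-- number of distinct names in ws with count ≥ stable_count (B's `satisfied`)
def Sg (stable_count : Int) (ws : List String) : Int :=
  ((PySem.Set.ofList ws).countP (fun n => decide (stable_count ≤ (ws.count n : Int))) : Int)

lemma sg_cons (st : Int) (x : String) (t : List String) :
    Sg st (x :: t) =
      Sg st t + (if st ≤ (t.count x : Int) + 1 ∧ ((t.count x : Int) < st ∨ (t.count x : Int) = 0) then 1 else 0) := by
  classical
  unfold Sg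
  set p' : String → Bool := fun n => decide (st ≤ ((x :: t).count n : Int)) with hp'
  set p : String → Bool := fun n => decide (st ≤ (t.count n : Int)) with hp
  have hcount_ne : ∀ a : String, a ≠ x → (x :: t).count a = t.count a := by
    intro a ha; simp [List.count_cons, Ne.symm ha]
  have hcx : (x :: t).count x = t.count x + 1 := by simp [List.count_cons]
  by_cases hx : x ∈ t
  · have hc1 : 1 ≤ t.count x := List.one_le_count_iff.2 hx
    have hmem : ∀ a, a ∈ PySem.Set.ofList (x :: t) ↔ a ∈ PySem.Set.ofList t := by
      intro a
      simp only [PySem.Set.mem_ofList, List.mem_cons]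
      constructor
      · rintro (rfl | h) <;> [exact hx; exact h]
      · exact Or.inr
    have hperm : (PySem.Set.ofList (x :: t)).Perm (PySem.Set.ofList t) :=
      (List.perm_ext_iff_of_nodup (PySem.Set.nodup_ofList _) (PySem.Set.nodup_ofList _)).2 hmem
    have hxs : x ∈ PySem.Set.ofList t := (PySem.Set.mem_ofList _ _).2 hx
    have h2 : (PySem.Set.ofList t).Perm (x :: (PySem.Set.ofList t).erase x) :=
      List.perm_cons_erase hxs
    have hcongr : ((PySem.Set.ofList t).erase x).countP p' = ((PySem.Set.ofList t).erase x).countP p := by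
      refine List.countP_congr ?_
      intro a ha
      have : a ≠ x ∧ a ∈ PySem.Set.ofList t := (List.Nodup.mem_erase_iff (PySem.Set.nodup_ofList _)).1 ha
      simp [hp', hp, hcount_ne a this.1]
    have e1 : (PySem.Set.ofList (x :: t)).countP p' = (PySem.Set.ofList t).countP p' :=
      hperm.countP_eq p'
    have e2 : (PySem.Set.ofList t).countP p'
        = (if p' x then 1 else 0) + ((PySem.Set.ofList t).erase x).countP p' := by
      rw [h2.countP_eq p', List.countP_cons]; omega
    have e3 : (PySem.Set.ofList t).countP p
        = (if p x then 1 else 0) + ((PySem.Set.ofList t).erase x).countP p := by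
      rw [h2.countP_eq p, List.countP_cons]; omega
    rw [e1, e2, e3, hcongr]
    have hpx' : p' x = decide (st ≤ (t.count x : Int) + 1) := by
      simp [hp', hcx]
    rw [hpx']
    by_cases h1 : st ≤ (t.count x : Int) + 1 <;> by_cases h2' : st ≤ (t.count x : Int) <;>
      simp [hp, h1, h2'] <;> omega
  · have hc0 : t.count x = 0 := List.count_eq_zero.2 hx
    have hxs : x ∉ PySem.Set.ofList t := fun h => hx ((PySem.Set.mem_ofList _ _).1 h)
    have hmem : ∀ a, a ∈ PySem.Set.ofList (x :: t) ↔ a ∈ x :: PySem.Set.ofList t := by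
      intro a; simp [PySem.Set.mem_ofList, List.mem_cons]
    have hperm : (PySem.Set.ofList (x :: t)).Perm (x :: PySem.Set.ofList t) :=
      (List.perm_ext_iff_of_nodup (PySem.Set.nodup_ofList _)
        (List.nodup_cons.2 ⟨hxs, PySem.Set.nodup_ofList _⟩)).2 hmem
    have hcongr : (PySem.Set.ofList t).countP p' = (PySem.Set.ofList t).countP p := by
      refine List.countP_congr ?_
      intro a ha
      have hax : a ≠ x := fun h => hxs (h ▸ ha)
      simp [hp', hp, hcount_ne a hax]
    rw [hperm.countP_eq p', List.countP_cons, hcongr]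
    have hpx' : p' x = decide (st ≤ (t.count x : Int) + 1) := by
      simp [hp', hcx]
    rw [hpx']
    by_cases h1 : st ≤ (t.count x : Int) + 1 <;> simp [h1, hc0] <;> omega

lemma sg_perm (st : Int) {l1 l2 : List String} (h : l1.Perm l2) : Sg st l1 = Sg st l2 := by
  unfold Sg
  have hperm : (PySem.Set.ofList l1).Perm (PySem.Set.ofList l2) :=
    (List.perm_ext_iff_of_nodup (PySem.Set.nodup_ofList _) (PySem.Set.nodup_ofList _)).2
      (fun a => by rw [PySem.Set.mem_ofList, PySem.Set.mem_ofList]; exact h.mem_iff)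
  rw [hperm.countP_eq]
  exact congrArg Nat.cast (List.countP_congr (fun a _ => by simp [h.count_eq]))

lemma sg_pos (st : Int) (ws : List String) :
    0 < Sg st ws ↔ ∃ n ∈ ws, st ≤ (ws.count n : Int) := by
  unfold Sg
  rw [Int.natCast_pos, List.countP_pos_iff]
  simp [PySem.Set.mem_ofList]

-- A's per-window Counter, characterised
lemma voteCounts_eq (w : List String) :
    (w.map frameSetA).foldl (fun d s => s.foldl (fun d p => d.modify p 0 (· + 1)) d)
      (PySem.Dict.empty : PySem.Dict String Int) = PySem.Dict.counter (wsOf w) := by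
  rw [List.foldl_map, PySem.Dict.counter_eq_foldl, wsOf, List.foldl_filter]
  congr 1
  funext d y
  by_cases hy : y = "Unknown" <;> simp [frameSetA, hy, PySem.Set.ofList]

lemma a_check_iff (st : Int) (w : List String) :
    ((PySem.Dict.counter (wsOf w)).items.any (fun pc => decide (st ≤ pc.2)) = true)
      ↔ 0 < Sg st (wsOf w) := by
  rw [sg_pos, PySem.Dict.items_counter, List.any_eq_true]
  constructor
  · rintro ⟨pc, hpc, hle⟩
    rcases List.mem_map.1 hpc with ⟨k, hk, rfl⟩
    exact ⟨k, (PySem.Set.mem_ofList _ _).1 hk, by simpa using hle⟩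
  · rintro ⟨n, hn, hle⟩
    exact ⟨(n, ((wsOf w).count n : Int)), List.mem_map.2 ⟨n, (PySem.Set.mem_ofList _ _).2 hn, rfl⟩, by simpa using hle⟩


lemma wsOf_cons_ne (y : String) (t : List String) (hy : y ≠ "Unknown") :
    wsOf (y :: t) = y :: wsOf t := by
  simp [wsOf, List.filter_cons, hy]

lemma wsOf_cons_unk (t : List String) : wsOf ("Unknown" :: t) = wsOf t := by
  simp [wsOf, List.filter_cons]

lemma wsOf_append_ne (w : List String) (x : String) (hx : x ≠ "Unknown") :
    wsOf (w ++ [x]) = wsOf w ++ [x] := by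
  simp [wsOf, List.filter_append, List.filter_cons, hx]

lemma wsOf_append_unk (w : List String) : wsOf (w ++ ["Unknown"]) = wsOf w := by
  simp [wsOf, List.filter_append, List.filter_cons]

lemma sg_snoc (st : Int) (t : List String) (x : String) :
    Sg st (t ++ [x]) =
      Sg st t + (if st ≤ (t.count x : Int) + 1 ∧ ((t.count x : Int) < st ∨ (t.count x : Int) = 0) then 1 else 0) := by
  rw [sg_perm st (List.perm_append_singleton x t), sg_cons]

lemma count_add (counts : PySem.Dict String Int) (w : List String) (x : String)
    (hx : x ≠ "Unknown")
    (hc : ∀ n, counts.getD n 0 = ((wsOf w).count n : Int)) :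
    ∀ n, (counts.insert x (counts.getD x 0 + 1)).getD n 0 = ((wsOf (w ++ [x])).count n : Int) := by
  intro n
  rw [wsOf_append_ne w x hx, PySem.Dict.getD_insert]
  by_cases hn : n = x
  · subst hn; simp [List.count_append, hc n]
  · rw [if_neg hn, hc n]
    simp [List.count_append, List.count_singleton', Ne.symm hn]

lemma sat_add (st tr : Int) (counts : PySem.Dict String Int) (sat : Int) (w : List String) (x : String)
    (hx : x ≠ "Unknown") (htr : tr = max st 1)
    (hc : ∀ n, counts.getD n 0 = ((wsOf w).count n : Int))
    (hs : sat = Sg st (wsOf w)) :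
    (if counts.getD x 0 + 1 = tr then sat + 1 else sat)
      = Sg st (wsOf (w ++ [x])) := by
  rw [wsOf_append_ne w x hx, sg_snoc, hc x, hs]
  rcases le_total st 1 with h | h
  · rw [htr, max_eq_right h]; split_ifs <;> omega
  · rw [htr, max_eq_left h]; split_ifs <;> omega

lemma count_del (counts : PySem.Dict String Int) (w1 : List String) (y : String)
    (hy : y ≠ "Unknown")
    (hc : ∀ n, counts.getD n 0 = ((wsOf (y :: w1)).count n : Int)) :
    ∀ n, (counts.insert y (counts.getD y 0 - 1)).getD n 0 = ((wsOf w1).count n : Int) := by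
  intro n
  rw [PySem.Dict.getD_insert]
  have hcn := hc n
  rw [wsOf_cons_ne y w1 hy] at hcn
  by_cases hn : n = y
  · rw [if_pos hn, hn, hc y, wsOf_cons_ne y w1 hy]
    simp [List.count_cons]
  · rw [if_neg hn, hcn]
    simp [List.count_cons, Ne.symm hn]

lemma sat_del (st tr : Int) (counts : PySem.Dict String Int) (sat : Int) (w1 : List String) (y : String)
    (hy : y ≠ "Unknown") (htr : tr = max st 1)
    (hc : ∀ n, counts.getD n 0 = ((wsOf (y :: w1)).count n : Int))
    (hs : sat = Sg st (wsOf (y :: w1))) :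
    (if counts.getD y 0 = tr then sat - 1 else sat)
      = Sg st (wsOf w1) := by
  have hcy := hc y
  rw [wsOf_cons_ne y w1 hy] at hcy
  have hcy' : counts.getD y 0 = ((wsOf w1).count y : Int) + 1 := by
    rw [hcy]; simp [List.count_cons]
  rw [wsOf_cons_ne y w1 hy, sg_cons] at hs
  rw [hcy', hs]
  rcases le_total st 1 with h | h
  · rw [htr, max_eq_right h]; split_ifs <;> omega
  · rw [htr, max_eq_left h]; split_ifs <;> omega

lemma main_eq (fr : List String) (H st tr : Int) (hH : 0 ≤ H) (htr : tr = max st 1) :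
    ∀ (l : List String) (i : ℕ) (pre w : List String) (counts : PySem.Dict String Int) (sat : Int),
      l = fr.drop i →
      pre ++ w = fr.take i →
      (w.length : Int) = min (i : Int) H →
      (∀ n, counts.getD n 0 = ((wsOf w).count n : Int)) →
      sat = Sg st (wsOf w) →
      simVotingA_go H st l ((i : Int) + 1) (w.map frameSetA)
        = simVotingB_go fr H tr l ((i : Int) + 1) counts sat := by
  intro l
  induction l with
  | nil => intros; rfl
  | cons x rest ih =>
    intro i pre w counts sat hl hw hlen hc hs
    have hifr : i < fr.length := by
      have hlen' := congrArg List.length hl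
      simp only [List.length_cons, List.length_drop] at hlen'
      omega
    have hdec := List.drop_eq_getElem_cons hifr
    rw [← hl] at hdec
    have hx : fr[i] = x := by injection hdec with h1 _; exact h1.symm
    have hdrop : rest = fr.drop (i + 1) := by injection hdec with _ h2
    have htake : fr.take (i + 1) = fr.take i ++ [x] := by
      rw [List.take_succ_eq_append_getElem hifr, hx]
    have hwtk : pre.length + w.length = i := by
      have := congrArg List.length hw
      simp only [List.length_append, List.length_take] at this
      omega
    -- the raw window after the deque append
    have hdq : dequeAppend (w.map frameSetA) (frameSetA x) H
        = ((if H ≤ (i : Int) then (w ++ [x]).drop 1 else w ++ [x]).map frameSetA) := by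
      unfold dequeAppend
      have hlc : ((w.map frameSetA ++ [frameSetA x]).length : Int) = min (i : Int) H + 1 := by
        simp only [List.length_append, List.length_map, List.length_cons, List.length_nil]
        push_cast
        omega
      by_cases hHi : H ≤ (i : Int)
      · rw [if_pos (by omega : H < ((w.map frameSetA ++ [frameSetA x]).length : Int)), if_pos hHi]
        simp [List.map_drop]
      · rw [if_neg (by omega : ¬ H < ((w.map frameSetA ++ [frameSetA x]).length : Int)), if_neg hHi]
        simp
    set w1 : List String := if H ≤ (i : Int) then (w ++ [x]).drop 1 else w ++ [x] with hw1
    have hlen1 : (w1.length : Int) = min ((i : Int) + 1) H := by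
      rw [hw1]
      by_cases hHi : H ≤ (i : Int)
      · rw [if_pos hHi]
        simp only [List.length_drop, List.length_append, List.length_cons, List.length_nil]
        push_cast
        omega
      · rw [if_neg hHi]
        simp only [List.length_append, List.length_cons, List.length_nil]
        push_cast
        omega
    -- B's state after the add step, with its invariants
    obtain ⟨counts1, sat1, hB1, hc1, hs1⟩ :
        ∃ c1 s1,
          (if x ≠ "Unknown" then
              (counts.insert x (counts.getD x 0 + 1),
               if counts.getD x 0 + 1 = tr then sat + 1 else sat)
            else (counts, sat)) = (c1, s1)
          ∧ (∀ n, c1.getD n 0 = ((wsOf (w ++ [x])).count n : Int))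
          ∧ s1 = Sg st (wsOf (w ++ [x])) := by
      by_cases hxU : x = "Unknown"
      · refine ⟨counts, sat, if_neg (fun h => h hxU), ?_, ?_⟩
        · subst hxU; rw [show wsOf (w ++ ["Unknown"]) = wsOf w from wsOf_append_unk w]; exact hc
        · subst hxU; rw [show wsOf (w ++ ["Unknown"]) = wsOf w from wsOf_append_unk w]; exact hs
      · exact ⟨_, _, if_pos hxU, count_add counts w x hxU hc, sat_add st tr counts sat w x hxU htr hc hs⟩
    -- unfold one step of both programs
    rw [simVotingA_go, simVotingB_go]
    simp only [hdq, ← hw1, hB1]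
    rw [List.length_map]
    by_cases hg : (i : Int) + 1 < H
    · -- window not yet full: A skips the vote, B's eviction-and-check guard is off
      rw [if_pos (by omega : (w1.length : Int) < H),
          if_neg (by omega : ¬ H ≤ (i : Int) + 1)]
      have hw1e : w1 = w ++ [x] := by rw [hw1, if_neg (by omega)]
      have ihx := ih (i + 1) pre (w ++ [x]) counts1 sat1 hdrop
        (by rw [htake, ← hw, List.append_assoc])
        (by simp only [List.length_append, List.length_cons, List.length_nil]; push_cast; omega)
        hc1 hs1
      push_cast at ihx
      rw [hw1e]
      exact ihx
    · -- window full
      rw [if_neg (by omega : ¬ (w1.length : Int) < H),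
          if_pos (by omega : H ≤ (i : Int) + 1)]
      rw [voteCounts_eq w1]
      by_cases hev : H < (i : Int) + 1
      · -- a frame leaves the window
        have hHi : H ≤ (i : Int) := by omega
        have htn : (H.toNat : Int) = H := Int.toNat_of_nonneg hH
        have hkid : (i : Int) + 1 - H - 1 = ((i - H.toNat : ℕ) : Int) := by push_cast; omega
        set k := i - H.toNat with hk
        have hkfr : k < fr.length := by omega
        have hold : PySem.List.pyGetD fr ((i : Int) + 1 - H - 1) "" = fr[k] := by
          rw [hkid, PySem.List.pyGetD_natCast, List.getD_eq_getElem fr "" hkfr]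
        have hwlen_nat : w.length = H.toNat := by omega
        have hw1d : w1 = (w ++ [x]).drop 1 := by rw [hw1, if_pos hHi]
        have hdecomp : w ++ [x] = fr[k] :: w1 := by
          rw [hw1d]
          rcases w with _ | ⟨wh, wt⟩
          · have hk0 : k = i := by simp at hwlen_nat; omega
            simp [hk0, hx]
          · simp only [List.length_cons] at hwtk hwlen_nat
            have hwh : wh = fr[k] := by
              have hki : k < (List.take i fr).length := by
                simp only [List.length_take]
                omega
              have e1 : (List.take i fr)[k]'hki = fr[k] := List.getElem_take
              have e3 := List.getElem_of_eq hw.symm hki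
              have hz : k - pre.length = 0 := by omega
              rw [← e1, e3, List.getElem_append_right (by omega : pre.length ≤ k)]
              simp [hz]
            simp [hwh]
        rw [hold]
        rw [hdecomp] at hc1 hs1
        obtain ⟨counts2, sat2, hB2, hc2, hs2⟩ :
            ∃ c2 s2,
              (if fr[k] ≠ "Unknown" then
                  (counts1.insert fr[k] (counts1.getD fr[k] 0 - 1),
                   if counts1.getD fr[k] 0 = tr then sat1 - 1 else sat1)
                else (counts1, sat1)) = (c2, s2)
              ∧ (∀ n, c2.getD n 0 = ((wsOf w1).count n : Int))
              ∧ s2 = Sg st (wsOf w1) := by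
          by_cases hyU : fr[k] = "Unknown"
          · refine ⟨counts1, sat1, if_neg (fun h => h hyU), ?_, ?_⟩
            · rw [hyU, wsOf_cons_unk] at hc1; exact hc1
            · rw [hyU, wsOf_cons_unk] at hs1; exact hs1
          · exact ⟨_, _, if_pos hyU, count_del counts1 w1 fr[k] hyU hc1,
              sat_del st tr counts1 sat1 w1 fr[k] hyU htr hc1 hs1⟩
        rw [hB2, if_pos hev]
        have hchk := a_check_iff st w1
        by_cases hpos : 0 < sat2
        · rw [if_pos (hchk.2 (by rw [← hs2]; exact hpos)), if_pos (by simpa using hpos)]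
        · rw [if_neg (fun h => hpos (by rw [hs2]; exact hchk.1 h)), if_neg (by simpa using hpos)]
          have ihx := ih (i + 1) (pre ++ [fr[k]]) w1 counts2 sat2 hdrop
            (by rw [List.append_assoc, List.singleton_append, ← hdecomp, ← List.append_assoc, hw, ← htake])
            (by push_cast; omega)
            hc2 hs2
          push_cast at ihx
          simpa using ihx
      · -- the window just became full, nothing leaves
        have hnHi : ¬ H ≤ (i : Int) := by omega
        have hw1e : w1 = w ++ [x] := by rw [hw1, if_neg hnHi]
        rw [if_neg hev]
        have hchk := a_check_iff st w1
        have hs1' : sat1 = Sg st (wsOf w1) := by rw [hw1e]; exact hs1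
        by_cases hpos : 0 < sat1
        · rw [if_pos (hchk.2 (by rw [← hs1']; exact hpos)), if_pos (by simpa using hpos)]
        · rw [if_neg (fun h => hpos (by rw [hs1']; exact hchk.1 h)), if_neg (by simpa using hpos)]
          have ihx := ih (i + 1) pre (w ++ [x]) counts1 sat1 hdrop
            (by rw [htake, ← hw, List.append_assoc])
            (by simp only [List.length_append, List.length_cons, List.length_nil]; push_cast; omega)
            hc1 hs1
          push_cast at ihx
          rw [hw1e]
          simpa using ihx


-- ===== VERDICT (by name: the statement is the Claim_ definition above) =====
theorem simulate_voting_spec : Claim_equal_simulate_voting := by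
  intro fr H st _ hpre
  unfold Spec_simulate_voting simulate_voting simulate_voting_alt
  have hH : (0:Int) ≤ H := hpre
  refine main_eq fr H st (max st 1) hH rfl fr 0 [] [] PySem.Dict.empty 0 rfl rfl ?_ ?_ ?_
  · simpa using hH
  · intro n; simp [wsOf]
  · simp [Sg, wsOf]
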